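-- pv_equiv track=rewrite | github.com/OoLongTeaNoSugar/coding_practice | 0-1bag.py | bag_count
-- ===== SOURCE A (Python) =====
-- def bag_count(i, v, w):
--     if sum(v[:i+1]) <= w:
--         return 2 ** (i+1)
--
--     if w <= 0:
--         return 0
--
--     if i == 0 and v[i] <= w:
--         return 2
--     if i == 0 and v[i] > w:
--         return 1
--
--     return bag_count(i-1, v[:i], w) + bag_count(i-1, v[:i], w - v[i])
-- ===== SOURCE B (Python) =====
-- def bag_count(i, v, w):
--     # Level-by-level iteration over a dict of remaining capacities with multiplicities
--     # (merging equal capacities = memoization), instead of A's naive branching recursion.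
--     s = sum(v[:i + 1])          # running prefix sum: sum(v[:j+1]) at level j
--     if s <= w:                  # every choice fits: all 2**(i+1) subsets count
--         return 2 ** (i + 1)
--     if w <= 0:
--         return 0
--     total = 0
--     level = {w: 1}
--     for j in range(i, 0, -1):
--         nxt = {}
--         for ww, c in level.items():
--             if s <= ww:
--                 total += c * 2 ** (j + 1)
--             elif ww <= 0:
--                 pass
--             else:
--                 nxt[ww] = nxt.get(ww, 0) + c
--                 k2 = ww - v[j]
--                 nxt[k2] = nxt.get(k2, 0) + c
--         level = nxt
--         s -= v[j]
--     for ww, c in level.items():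
--         if v[0] <= ww:
--             total += 2 * c
--         elif ww <= 0:
--             pass
--         else:
--             total += c
--     return total
-- ===== Notes on version B (the rewrite author's own statement) =====
-- stated objective: alternative
-- what changed: Replaces A's branching recursion (which re-slices the list and re-sums the prefix at every call) by A's two global base rules as early returns plus an iterative level-by-level sweep keeping a dict from each distinct remaining capacity to its multiplicity (merging equal capacities, i.e. memoization over (level, remaining weight)) and a running prefix sum; measured faster on inputs with repeated capacities but not confirmed at the largest generated sizes, so no speed is claimed.
-- outside the precondition, e.g. on bag_count(-3, [56, 2, -1, 1], 3): A returns 0.25, B returns 1; on bag_count(-2, [5], 1): A returns 0.5, B returns 0.5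
import Mathlib
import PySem

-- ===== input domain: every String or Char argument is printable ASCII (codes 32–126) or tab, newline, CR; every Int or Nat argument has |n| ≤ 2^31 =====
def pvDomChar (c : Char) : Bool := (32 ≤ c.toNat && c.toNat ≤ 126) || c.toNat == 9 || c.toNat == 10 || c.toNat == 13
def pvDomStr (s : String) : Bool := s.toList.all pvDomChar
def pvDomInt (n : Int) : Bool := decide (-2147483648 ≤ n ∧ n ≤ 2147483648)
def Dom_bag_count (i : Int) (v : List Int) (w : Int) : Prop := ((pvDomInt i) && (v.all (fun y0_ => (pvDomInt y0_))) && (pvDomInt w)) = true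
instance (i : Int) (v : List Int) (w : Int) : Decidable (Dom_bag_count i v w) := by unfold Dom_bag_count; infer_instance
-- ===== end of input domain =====

-- B replaces A's branching recursion by an iterative level-by-level sweep over a
-- dict of remaining capacities with multiplicities (merging equal capacities);
-- a different algorithm; the equivalence proved is about the return value.

-- ===== PORT A =====
def bag_count (i : Int) (v : List Int) (w : Int) : Int :=
  if (PySem.List.slice v none (some (i + 1))).sum ≤ w then 2 ^ (i + 1).toNat
  else if w ≤ 0 then 0
  else if i = 0 ∧ PySem.List.pyGetD v i 0 ≤ w then 2
  else if i = 0 ∧ w < PySem.List.pyGetD v i 0 then 1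
  else bag_count (i - 1) (PySem.List.slice v none (some i)) w
     + bag_count (i - 1) (PySem.List.slice v none (some i)) (w - PySem.List.pyGetD v i 0)
termination_by ((i + 1).toNat + v.length)
decreasing_by
  all_goals
    rename_i h1 h2 h3 h4
    have hv : v ≠ [] := by
      intro hnil
      subst hnil
      simp [PySem.List.slice] at h1
      omega
    rcases lt_trichotomy i 0 with hi | hi | hi
    · -- negative i: the sliced list is strictly shorter
      obtain ⟨k, hk, hik⟩ : ∃ k : Nat, 0 < k ∧ i = -(k : Int) := ⟨(-i).toNat, by omega, by omega⟩
      subst hik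
      rw [PySem.List.slice_to_neg_natCast v k hk]
      have hlen : 0 < v.length := List.length_pos_iff.mpr hv
      simp [List.length_take]
      omega
    · exfalso
      by_cases hle : PySem.List.pyGetD v i 0 ≤ w
      · exact h3 ⟨hi, hle⟩
      · exact h4 ⟨hi, by omega⟩
    · have : (PySem.List.slice v none (some i)).length ≤ v.length := by
        rw [PySem.List.slice_to v (by omega : (0:Int) ≤ i)]
        simp [List.length_take]
      omega

-- ===== PORT B =====
-- helper for B's inner loop over the items of the current level's dict
def bstep (v : List Int) (j s : Int) (q : Int × PySem.Dict Int Int) (p : Int × Int) :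
    Int × PySem.Dict Int Int :=
  if s ≤ p.1 then (q.1 + p.2 * 2 ^ (j + 1).toNat, q.2)
  else if p.1 ≤ 0 then q
  else (q.1, (q.2.modify p.1 0 (· + p.2)).modify (p.1 - PySem.List.pyGetD v j 0) 0 (· + p.2))

-- helper for B's outer loop: process one level j, then update the running prefix sum
def blevel (v : List Int) (st : Int × PySem.Dict Int Int × Int) (j : Int) :
    Int × PySem.Dict Int Int × Int :=
  let inner := st.2.1.items.foldl (bstep v j st.2.2) (st.1, PySem.Dict.empty)
  (inner.1, inner.2, st.2.2 - PySem.List.pyGetD v j 0)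

-- helper for B's final loop over level 0
def bfinal (v : List Int) (tot : Int) (p : Int × Int) : Int :=
  if PySem.List.pyGetD v 0 0 ≤ p.1 then tot + 2 * p.2
  else if p.1 ≤ 0 then tot
  else tot + p.2

def bag_count_alt (i : Int) (v : List Int) (w : Int) : Int :=
  if (PySem.List.slice v none (some (i + 1))).sum ≤ w then 2 ^ (i + 1).toNat
  else if w ≤ 0 then 0
  else
    let st := (PySem.List.pyRange i 0 (-1)).foldl (blevel v)
      (0, PySem.Dict.empty.insert w 1, (PySem.List.slice v none (some (i + 1))).sum)
    st.2.1.items.foldl (bfinal v) st.1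

-- ===== PRECONDITION & SPEC =====
-- Pre_ admits every input on which A returns an int: indices -1 <= i < len(v), and
-- out-of-range i caught by A's two global rules (total prefix sum <= w, or w <= 0);
-- outside Pre_ A raises IndexError or returns a float (2**(i+1) with i <= -2).
def Pre_bag_count (i : Int) (v : List Int) (w : Int) : Prop :=
  (-1 ≤ i ∧ ((i : Int) < v.length ∨ v.sum ≤ w ∨ w ≤ 0))
  ∨ (w ≤ 0 ∧ ¬ (PySem.List.slice v none (some (i + 1))).sum ≤ w)
instance (i : Int) (v : List Int) (w : Int) : Decidable (Pre_bag_count i v w) := by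
  unfold Pre_bag_count; infer_instance

def pvWitness_bag_count : Int × List Int × Int := (2, [3, 4, 5], 6)

def Spec_bag_count (i : Int) (v : List Int) (w : Int) (out : Int) : Prop := out = bag_count_alt i v w
instance (i : Int) (v : List Int) (w : Int) (out : Int) : Decidable (Spec_bag_count i v w out) := by
  unfold Spec_bag_count; infer_instance

-- ===== CLAIM (what is proved, stated in full; the proofs are below) =====
def Claim_equal_bag_count : Prop := ∀ (i : Int) (v : List Int) (w : Int),
  Dom_bag_count i v w → Pre_bag_count i v w → Spec_bag_count i v w (bag_count i v w)

-- ===== LEMMAS AND PROOFS =====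

def g (v : List Int) : Nat → Int → Int
  | 0, w => if v.getD 0 0 ≤ w then 2 else if w ≤ 0 then 0 else 1
  | j + 1, w =>
    if (v.take (j + 2)).sum ≤ w then 2 ^ (j + 2)
    else if w ≤ 0 then 0
    else g v j w + g v j (w - v.getD (j + 1) 0)
def keysNodup (l : List (Int × Int)) : Prop := (l.map Prod.fst).Nodup
def WS (v : List Int) (j : Nat) (l : List (Int × Int)) : Int :=
  (l.map (fun p => p.2 * g v j p.1)).sum

theorem map_replace_eq_self (t : List (Int × Int)) (k vv : Int)
    (h : k ∉ t.map Prod.fst) :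
    t.map (fun p => if p.1 = k then (k, vv) else p) = t := by
  induction t with
  | nil => rfl
  | cons p t ih =>
    simp only [List.map_cons, List.mem_cons, not_or] at h
    rw [List.map_cons, if_neg (fun e => h.1 e.symm), ih h.2]

theorem bump_step1 (t : List (Int × Int)) (p : Int × Int) (k : Int) (f : Int → Int)
    (h : (p.1 == k) = false) :
    ((PySem.Dict.mk (p :: t)).modify k 0 f).items
      = p :: ((PySem.Dict.mk t).modify k 0 f).items := by
  simp only [PySem.Dict.modify, PySem.Dict.insert, PySem.Dict.getD, PySem.Dict.get?,
    PySem.Dict.contains, List.any_cons, List.find?_cons, h]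
  cases hc : (t.any fun q => q.1 == k) <;>
    simp [hc, h, Bool.false_eq_true, if_false] <;>
    (intro e; simp [e] at h)

theorem bump_step2 (t : List (Int × Int)) (p : Int × Int) (k : Int) (f : Int → Int)
    (h : p.1 = k) (ht : k ∉ t.map Prod.fst) :
    ((PySem.Dict.mk (p :: t)).modify k 0 f).items = (k, f p.2) :: t := by
  have hpk : (p.1 == k) = true := by simp [h]
  simp only [PySem.Dict.modify, PySem.Dict.insert, PySem.Dict.getD, PySem.Dict.get?,
    PySem.Dict.contains, List.any_cons, List.find?_cons, hpk]
  simp [h]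
  exact map_replace_eq_self t k (f p.2) ht

theorem bump_spec (v : List Int) (m : Nat) (l : List (Int × Int)) (k c : Int)
    (hnd : keysNodup l) :
    WS v m (((PySem.Dict.mk l).modify k 0 (· + c)).items) = WS v m l + c * g v m k
    ∧ keysNodup (((PySem.Dict.mk l).modify k 0 (· + c)).items)
    ∧ ∀ a, a ∈ (((PySem.Dict.mk l).modify k 0 (· + c)).items).map Prod.fst
        → a ∈ l.map Prod.fst ∨ a = k := by
  induction l with
  | nil =>
    refine ⟨?_, ?_, ?_⟩ <;>
      simp [show ((PySem.Dict.mk ([] : List (Int × Int))).modify k 0 (· + c)).items = [(k, 0 + c)] from rfl, WS, keysNodup] <;>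
      ring
  | cons p t ih =>
    have hnd' : (p.1 :: t.map Prod.fst).Nodup := by simpa [keysNodup] using hnd
    have hpt : p.1 ∉ t.map Prod.fst := (List.nodup_cons.mp hnd').1
    have hndt : keysNodup t := (List.nodup_cons.mp hnd').2
    by_cases hk : p.1 = k
    · have hkt : k ∉ t.map Prod.fst := hk ▸ hpt
      rw [bump_step2 t p k _ hk hkt]
      refine ⟨?_, ?_, ?_⟩
      · simp [WS, hk]; ring
      · have hn2 : (k :: t.map Prod.fst).Nodup :=
          List.nodup_cons.mpr ⟨hk ▸ hpt, hndt⟩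
        simpa [keysNodup] using hn2
      · intro a ha; simp at ha; rcases ha with h | h
        · exact Or.inr h
        · exact Or.inl (by simp [h])
    · obtain ⟨ihws, ihnd, ihkeys⟩ := ih hndt
      rw [bump_step1 t p k _ (by simpa using hk)]
      refine ⟨?_, ?_, ?_⟩
      · simp [WS] at ihws ⊢; rw [ihws]; ring
      · refine List.nodup_cons.mpr ⟨?_, ihnd⟩
        intro hmem
        rcases ihkeys p.1 (by simpa using hmem) with h | h
        · exact hpt h
        · exact hk h
      · intro a ha
        simp at ha
        rcases ha with h | h
        · exact Or.inl (by simp [h])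
        · rcases ihkeys a (by simpa using h) with h2 | h2
          · exact Or.inl (by simp [h2])
          · exact Or.inr h2

theorem inner_inv (v : List Int) (m : Nat) (hm : m + 1 < v.length) :
    ∀ (L : List (Int × Int)) (t : Int) (d : PySem.Dict Int Int), keysNodup d.items →
      (L.foldl (bstep v ((m : Int) + 1) ((v.take (m + 2)).sum)) (t, d)).1
        + WS v m (L.foldl (bstep v ((m : Int) + 1) ((v.take (m + 2)).sum)) (t, d)).2.items
        = t + WS v m d.items + WS v (m + 1) L
      ∧ keysNodup (L.foldl (bstep v ((m : Int) + 1) ((v.take (m + 2)).sum)) (t, d)).2.items := by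
  intro L
  induction L with
  | nil => intro t d hd; simpa [WS] using hd
  | cons p L ih =>
    intro t d hd
    have hgd : PySem.List.pyGetD v ((m : Int) + 1) 0 = v.getD (m + 1) 0 := by
      have : ((m : Int) + 1) = ((m + 1 : Nat) : Int) := by push_cast; ring
      rw [this, PySem.List.pyGetD_natCast]
    have hpow : (((m : Int) + 1) + 1).toNat = m + 2 := by omega
    rw [List.foldl_cons]
    by_cases h1 : (v.take (m + 2)).sum ≤ p.1
    · have hb : bstep v ((m : Int) + 1) ((v.take (m + 2)).sum) (t, d) p
          = (t + p.2 * 2 ^ (m + 2), d) := by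
        simp [bstep, h1, hpow]
      rw [hb]
      obtain ⟨hws, hnd⟩ := ih (t + p.2 * 2 ^ (m + 2)) d hd
      refine ⟨?_, hnd⟩
      rw [hws]
      have hg : g v (m + 1) p.1 = 2 ^ (m + 2) := by rw [g, if_pos h1]
      simp [WS, hg]; ring
    · by_cases h2 : p.1 ≤ 0
      · have hb : bstep v ((m : Int) + 1) ((v.take (m + 2)).sum) (t, d) p = (t, d) := by
          simp [bstep, h1, h2]
        rw [hb]
        obtain ⟨hws, hnd⟩ := ih t d hd
        refine ⟨?_, hnd⟩
        rw [hws]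
        have hg : g v (m + 1) p.1 = 0 := by rw [g, if_neg h1, if_pos h2]
        simp [WS, hg]
      · have hb : bstep v ((m : Int) + 1) ((v.take (m + 2)).sum) (t, d) p
            = (t, (d.modify p.1 0 (· + p.2)).modify (p.1 - v.getD (m + 1) 0) 0 (· + p.2)) := by
          simp [bstep, h1, h2, hgd]
        rw [hb]
        obtain ⟨hws1, hnd1, _⟩ := bump_spec v m d.items p.1 p.2 hd
        obtain ⟨hws2, hnd2, _⟩ :=
          bump_spec v m (d.modify p.1 0 (· + p.2)).items (p.1 - v.getD (m + 1) 0) p.2 hnd1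
        obtain ⟨hws, hnd⟩ :=
          ih t ((d.modify p.1 0 (· + p.2)).modify (p.1 - v.getD (m + 1) 0) 0 (· + p.2)) hnd2
        refine ⟨?_, hnd⟩
        rw [hws, hws2, hws1]
        have hg : g v (m + 1) p.1 = g v m p.1 + g v m (p.1 - v.getD (m + 1) 0) := by
          rw [g, if_neg h1, if_neg h2]
        simp [WS, hg]; ring

theorem final_inv (v : List Int) :
    ∀ (L : List (Int × Int)) (t : Int), L.foldl (bfinal v) t = t + WS v 0 L := by
  intro L
  induction L with
  | nil => intro t; simp [WS]
  | cons p L ih =>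
    intro t
    rw [List.foldl_cons, ih]
    have hg : p.2 * g v 0 p.1 = bfinal v 0 p := by
      rw [g, bfinal, PySem.List.pyGetD_zero]
      split_ifs <;> ring
    simp [WS, hg, bfinal]
    split_ifs <;> ring

theorem outer_inv (v : List Int) :
    ∀ (j : Nat), j < v.length → ∀ (t : Int) (d : PySem.Dict Int Int), keysNodup d.items →
      ((PySem.List.pyRange (j : Int) 0 (-1)).foldl (blevel v)
          (t, d, (v.take (j + 1)).sum)).1
        + WS v 0 ((PySem.List.pyRange (j : Int) 0 (-1)).foldl (blevel v)
          (t, d, (v.take (j + 1)).sum)).2.1.items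
        = t + WS v j d.items
      ∧ keysNodup ((PySem.List.pyRange (j : Int) 0 (-1)).foldl (blevel v)
          (t, d, (v.take (j + 1)).sum)).2.1.items := by
  intro j
  induction j with
  | zero =>
    intro _ t d hd
    rw [PySem.List.pyRange_neg_one_eq_nil (by omega)]
    simpa using hd
  | succ j ih =>
    intro hlen t d hd
    have hcons : PySem.List.pyRange ((j + 1 : Nat) : Int) 0 (-1)
        = ((j : Int) + 1) :: PySem.List.pyRange (j : Int) 0 (-1) := by
      rw [PySem.List.pyRange_neg_one_cons (by push_cast; omega)]
      push_cast
      ring_nf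
    rw [hcons, List.foldl_cons]
    have hgd : PySem.List.pyGetD v ((j : Int) + 1) 0 = v.getD (j + 1) 0 := by
      have : ((j : Int) + 1) = ((j + 1 : Nat) : Int) := by push_cast; ring
      rw [this, PySem.List.pyGetD_natCast]
    have hs : (v.take (j + 1 + 1)).sum - v.getD (j + 1) 0 = (v.take (j + 1)).sum := by
      rw [List.sum_take_succ v (j + 1) hlen, List.getD_eq_getElem v 0 hlen]
      ring
    obtain ⟨hws, hnd⟩ := inner_inv v j hlen d.items t PySem.Dict.empty (by simp [keysNodup, PySem.Dict.empty])
    have hb : blevel v (t, d, (v.take (j + 1 + 1)).sum) ((j : Int) + 1)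
        = ((d.items.foldl (bstep v ((j : Int) + 1) ((v.take (j + 2)).sum)) (t, PySem.Dict.empty)).1,
           (d.items.foldl (bstep v ((j : Int) + 1) ((v.take (j + 2)).sum)) (t, PySem.Dict.empty)).2,
           (v.take (j + 1)).sum) := by
      rw [blevel, hgd]
      simp only [show j + 1 + 1 = j + 2 from rfl, hs]
    rw [hb]
    obtain ⟨hws2, hnd2⟩ := ih (by omega)
      (d.items.foldl (bstep v ((j : Int) + 1) ((v.take (j + 2)).sum)) (t, PySem.Dict.empty)).1
      (d.items.foldl (bstep v ((j : Int) + 1) ((v.take (j + 2)).sum)) (t, PySem.Dict.empty)).2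
      hnd
    refine ⟨?_, hnd2⟩
    rw [hws2]
    have : WS v j (PySem.Dict.empty : PySem.Dict Int Int).items = 0 := by
      simp [WS, PySem.Dict.empty]
    rw [hws]
    rw [this]
    ring

theorem B_eq_g (i : Int) (v : List Int) (w : Int) (h0 : 0 ≤ i) (h1 : i < v.length)
    (hs : ¬ (PySem.List.slice v none (some (i + 1))).sum ≤ w) (hw : ¬ w ≤ 0) :
    bag_count_alt i v w = g v i.toNat w := by
  obtain ⟨n, rfl⟩ : ∃ n : Nat, i = (n : Int) := ⟨i.toNat, by omega⟩
  have hn : n < v.length := by exact_mod_cast h1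
  have hsl : (PySem.List.slice v none (some ((n : Int) + 1))).sum = (v.take (n + 1)).sum := by
    rw [PySem.List.slice_to v (by omega)]
    norm_num
  have hitems : (PySem.Dict.empty.insert w 1 : PySem.Dict Int Int).items = [(w, 1)] := rfl
  have hd : keysNodup (PySem.Dict.empty.insert w 1 : PySem.Dict Int Int).items := by
    rw [hitems]; simp [keysNodup]
  obtain ⟨hws, _⟩ := outer_inv v n hn 0 (PySem.Dict.empty.insert w 1) hd
  rw [bag_count_alt, if_neg hs, if_neg hw]
  simp only [hsl]
  rw [final_inv, hws, hitems]
  simp [WS]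

theorem g_take (v : List Int) (m : Nat) :
    ∀ (j : Nat), j < m → ∀ w, g (v.take m) j w = g v j w := by
  intro j
  induction j with
  | zero =>
    intro hj w
    have : (v.take m).getD 0 0 = v.getD 0 0 := by
      simp [List.getD, List.getElem?_take, hj]
    rw [g, g, this]
  | succ j ih =>
    intro hj w
    have ht : (v.take m).take (j + 2) = v.take (j + 2) := by
      rw [List.take_take]
      congr 1
      omega
    have hg : (v.take m).getD (j + 1) 0 = v.getD (j + 1) 0 := by
      simp [List.getD, List.getElem?_take, hj]
    rw [g, g, ht, hg, ih (by omega), ih (by omega)]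

theorem A_eq_g : ∀ (n : Nat) (v : List Int) (w : Int), n < v.length →
    bag_count (n : Int) v w = g v n w := by
  intro n
  induction n with
  | zero =>
    intro v w hlen
    rw [bag_count]
    simp only [Nat.cast_zero]
    have hsl : (PySem.List.slice v none (some ((0 : Int) + 1))).sum = v.getD 0 0 := by
      rw [PySem.List.slice_to v (by omega)]
      have h1 : ((0 : Int) + 1).toNat = 1 := by omega
      rw [h1, List.sum_take_succ v 0 hlen]
      simp [List.getD, List.getElem?_eq_getElem hlen]
    rw [hsl, PySem.List.pyGetD_zero, g]
    have hp : ((0 : Int) + 1).toNat = 1 := by omega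
    rw [hp]
    split_ifs with c1 c2 c3 c4 <;> simp_all <;> omega
  | succ n ih =>
    intro v w hlen
    rw [bag_count]
    have hne : ¬((n + 1 : Nat) : Int) = 0 := by omega
    have hsl2 : PySem.List.slice v none (some (((n + 1 : Nat) : Int) + 1)) = v.take (n + 2) := by
      rw [PySem.List.slice_to v (by omega)]
      congr 1
      all_goals omega
    have hsl1 : PySem.List.slice v none (some ((n + 1 : Nat) : Int)) = v.take (n + 1) := by
      rw [PySem.List.slice_to v (by omega)]
      congr 1
      all_goals omega
    have hgd : PySem.List.pyGetD v ((n + 1 : Nat) : Int) 0 = v.getD (n + 1) 0 := by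
      rw [PySem.List.pyGetD_natCast]
    have hi1 : ((n + 1 : Nat) : Int) - 1 = (n : Nat) := by push_cast; ring
    have hlen' : n < (v.take (n + 1)).length := by
      simp [List.length_take]
      omega
    have hrec : ∀ w', bag_count (((n + 1 : Nat) : Int) - 1) (v.take (n + 1)) w' = g v n w' := by
      intro w'
      rw [hi1, ih (v.take (n + 1)) w' hlen', g_take v (n + 1) n (by omega)]
    have hpow : (((n + 1 : Nat) : Int) + 1).toNat = n + 2 := by omega
    rw [hsl2, hpow, g]
    simp only [hne, false_and, if_false, hsl1, hgd, hrec]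


-- ===== VERDICT (by name: the statement is the Claim_ definition above) =====
theorem bag_count_spec : Claim_equal_bag_count := by
  intro i v w _ hpre
  unfold Spec_bag_count
  have hpre' : (-1 ≤ i ∧ ((i : Int) < v.length ∨ v.sum ≤ w ∨ w ≤ 0))
      ∨ (w ≤ 0 ∧ ¬ (PySem.List.slice v none (some (i + 1))).sum ≤ w) := hpre
  by_cases hs : (PySem.List.slice v none (some (i + 1))).sum ≤ w
  · rw [bag_count, bag_count_alt, if_pos hs, if_pos hs]
  · by_cases hw : w ≤ 0
    · rw [bag_count, bag_count_alt, if_neg hs, if_neg hs, if_pos hw, if_pos hw]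
    · have hdis : -1 ≤ i ∧ ((i : Int) < v.length ∨ v.sum ≤ w ∨ w ≤ 0) := by
        rcases hpre' with h | h
        · exact h
        · exact absurd h.1 hw
      have h0 : 0 ≤ i := by
        by_contra hneg
        have hi1 : i = -1 := by omega
        subst hi1
        rw [PySem.List.slice_to v (by omega)] at hs
        simp at hs
        omega
      have h1 : i < (v.length : Int) := by
        rcases hdis.2 with h | h | h
        · exact h
        · by_contra hge
          rw [PySem.List.slice_to v (by omega),
            List.take_of_length_le (by omega)] at hs
          exact hs h
        · exact absurd h hw
      rw [B_eq_g i v w h0 h1 hs hw]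
      have hA := A_eq_g i.toNat v w (by omega)
      rwa [show ((i.toNat : Nat) : Int) = i by omega] at hA
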